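-- pv_equiv track=rewrite | github.com/Ghenntoggy1/CS-Laboratory-Works | Laboratory-Work-1-Caesar-Cipher/main.py | permute_alphabet
-- ===== SOURCE A (Python) =====
-- def permute_alphabet(alphabet: list[str], shift_key: int) -> list[str]:
--     permuted_alphabet: list[str] = []
--     for i in range(len(alphabet)):
--         if i + shift_key < len(alphabet) - 1:
--             letter = alphabet[i + shift_key]
--         else:
--             letter = alphabet[(i + shift_key) % len(alphabet)]
--         permuted_alphabet.insert(i, letter)
--     return permuted_alphabet
-- ===== SOURCE B (Python) =====
-- def permute_alphabet(alphabet: list[str], shift_key: int) -> list[str]: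
--     if not alphabet:
--         return []
--     k = shift_key % len(alphabet)
--     return alphabet[k:] + alphabet[:k]
-- ===== Notes on version B (the rewrite author's own statement) =====
-- stated objective: simpler
-- what changed: B replaces A's index-by-index loop (with its per-index branch and repeated modular indexing) by a closed-form rotation: one modulus and a single slice-and-concatenate alphabet[k:] + alphabet[:k].
import Mathlib
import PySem

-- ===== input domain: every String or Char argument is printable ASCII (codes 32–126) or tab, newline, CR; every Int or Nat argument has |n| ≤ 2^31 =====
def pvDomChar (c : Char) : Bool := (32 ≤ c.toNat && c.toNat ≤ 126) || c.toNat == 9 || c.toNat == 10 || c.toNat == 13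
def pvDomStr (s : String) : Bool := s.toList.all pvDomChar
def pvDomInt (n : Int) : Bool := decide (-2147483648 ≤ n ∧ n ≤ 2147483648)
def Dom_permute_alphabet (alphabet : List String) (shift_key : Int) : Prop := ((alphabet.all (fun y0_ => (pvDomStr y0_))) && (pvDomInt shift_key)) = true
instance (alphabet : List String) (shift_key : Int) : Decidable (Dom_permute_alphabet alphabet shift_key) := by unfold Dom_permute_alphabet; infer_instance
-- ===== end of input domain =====

-- B replaces A's index-by-index loop by a closed-form slice rotation alphabet[k:]+alphabet[:k] (simpler, same O(n) cost).


-- ===== PORT A =====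
def permute_alphabet (alphabet : List String) (shift_key : Int) : List String :=
  (PySem.List.pyRange 0 (alphabet.length : Int)).foldl
    (fun permuted_alphabet i =>
      let letter :=
        if i + shift_key < (alphabet.length : Int) - 1 then
          PySem.List.pyGetD alphabet (i + shift_key) ""
        else
          PySem.List.pyGetD alphabet (PySem.Int.mod (i + shift_key) (alphabet.length : Int)) ""
      PySem.List.insert permuted_alphabet i letter) []

-- ===== PORT B =====
def permute_alphabet_alt (alphabet : List String) (shift_key : Int) : List String :=
  if alphabet = [] then []
  else
    let k := PySem.Int.mod shift_key (alphabet.length : Int)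
    PySem.List.slice alphabet (some k) none ++ PySem.List.slice alphabet none (some k)

-- ===== PRECONDITION & SPEC =====
-- Pre_ excludes exactly the inputs where A raises IndexError: non-empty alphabet with shift_key < -len(alphabet).
def Pre_permute_alphabet (alphabet : List String) (shift_key : Int) : Prop :=
  alphabet = [] ∨ -(alphabet.length : Int) ≤ shift_key
instance (alphabet : List String) (shift_key : Int) : Decidable (Pre_permute_alphabet alphabet shift_key) := by unfold Pre_permute_alphabet; infer_instance
def pvWitness_permute_alphabet : List String × Int := (["a", "b", "c"], 1)

def Spec_permute_alphabet (alphabet : List String) (shift_key : Int) (out : List String) : Prop := out = permute_alphabet_alt alphabet shift_key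
instance (alphabet : List String) (shift_key : Int) (out : List String) : Decidable (Spec_permute_alphabet alphabet shift_key out) := by unfold Spec_permute_alphabet; infer_instance

-- ===== CLAIM (what is proved, stated in full; the proofs are below) =====
def Claim_equal_permute_alphabet : Prop := ∀ (alphabet : List String) (shift_key : Int), Dom_permute_alphabet alphabet shift_key → Pre_permute_alphabet alphabet shift_key → Spec_permute_alphabet alphabet shift_key (permute_alphabet alphabet shift_key)

-- ===== LEMMAS AND PROOFS =====

-- A's loop 'permuted.insert(i, letter)' with the accumulator of length i appends; folded over range(n) it is a map.
theorem foldl_insert_eq_map {α : Type} (f : Int → α) (n : Nat) :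
    (PySem.List.pyRange 0 (n : Int)).foldl (fun acc i => PySem.List.insert acc i (f i)) []
      = (PySem.List.pyRange 0 (n : Int)).map f := by
  induction n with
  | zero => simp [PySem.List.pyRange]
  | succ m ih =>
    have h : ((m : Int) + 1) = ((m + 1 : Nat) : Int) := by push_cast; ring
    rw [← h, PySem.List.pyRange_one_succ_right (by exact_mod_cast Nat.zero_le m), List.foldl_append, List.map_append, ih]
    simp only [List.foldl_cons, List.foldl_nil, List.map_cons, List.map_nil]
    have hlen : ((PySem.List.pyRange 0 (m : Int)).map f).length = m := by
      rw [PySem.List.pyRange_zero_natCast]; simp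
    rw [PySem.List.insert_natCast _ m _ (le_of_eq hlen.symm)]
    simp [List.take_of_length_le hlen.le, List.drop_of_length_le hlen.le]

-- pyGetD with an index t ∈ [-n, n) reads the element at (t mod n).
theorem pyGetD_eq_getD_mod {α : Type} (xs : List α) (t : Int) (d : α)
    (h1 : -(xs.length : Int) ≤ t) (h2 : t < (xs.length : Int)) (hne : xs ≠ []) :
    PySem.List.pyGetD xs t d = xs.getD (PySem.Int.mod t (xs.length : Int)).toNat d := by
  have hn : 0 < (xs.length : Int) := by
    have := List.length_pos_iff.mpr hne; exact_mod_cast this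
  rw [PySem.Int.mod_eq_emod_of_pos hn]
  by_cases ht : 0 ≤ t
  · rw [show t = ((t.toNat : Nat) : Int) by omega, PySem.List.pyGetD_natCast,
      Int.emod_eq_of_lt (by omega) (by omega)]
    simp [max_eq_left ht]
  · push Not at ht
    have h1 : (t + (xs.length : Int)) % (xs.length : Int) = t % (xs.length : Int) := by
      simpa using Int.add_mul_emod_self_left (a := t) (b := (xs.length : Int)) (c := 1)
    have hmod : t % (xs.length : Int) = t + xs.length :=
      h1.symm.trans (Int.emod_eq_of_lt (by omega) (by omega))
    have hin := PySem.List.pyGetD_neg_natCast xs (-t).toNat d (by omega) (by omega)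
    rw [show -(((-t).toNat : Nat) : Int) = t by omega] at hin
    rw [hin, hmod, List.getD_eq_getElem _ _ (show (t + (xs.length : Int)).toNat < xs.length by omega)]
    congr 1
    omega

-- The rotated read: element i of A's output, as a function of i only.
theorem permute_A_eq_map (alphabet : List String) (shift_key : Int)
    (hpre : -(alphabet.length : Int) ≤ shift_key) (hne : alphabet ≠ []) :
    permute_alphabet alphabet shift_key
      = (List.range alphabet.length).map
          (fun (j : Nat) => alphabet.getD (PySem.Int.mod ((j : Int) + shift_key) (alphabet.length : Int)).toNat "") := by
  have hn : 0 < (alphabet.length : Int) := by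
    have := List.length_pos_iff.mpr hne; exact_mod_cast this
  unfold permute_alphabet
  rw [foldl_insert_eq_map (f := fun i =>
        if i + shift_key < (alphabet.length : Int) - 1 then
          PySem.List.pyGetD alphabet (i + shift_key) ""
        else
          PySem.List.pyGetD alphabet (PySem.Int.mod (i + shift_key) (alphabet.length : Int)) "")]
  rw [PySem.List.pyRange_zero_natCast, List.map_map]
  apply List.map_congr_left
  intro j hj
  have hj' : j < alphabet.length := List.mem_range.mp hj
  simp only [Function.comp]
  split_ifs with hlt
  · exact pyGetD_eq_getD_mod alphabet ((j : Int) + shift_key) "" (by omega) (by omega) hne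
  · set r := PySem.Int.mod ((j : Int) + shift_key) (alphabet.length : Int) with hr
    have h0 : 0 ≤ r := PySem.Int.mod_nonneg _ hn
    have h1 : r < (alphabet.length : Int) := PySem.Int.mod_lt _ hn
    rw [show r = ((r.toNat : Nat) : Int) by omega, PySem.List.pyGetD_natCast]
    simp [max_eq_left h0]

-- ===== VERDICT (by name: the statement is the Claim_ definition above) =====
theorem permute_alphabet_spec : Claim_equal_permute_alphabet := by
  intro alphabet shift_key _ hpre
  unfold Spec_permute_alphabet permute_alphabet_alt
  by_cases hne : alphabet = []
  · subst hne; simp [permute_alphabet, PySem.List.pyRange]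
  · rcases hpre with h | hpre
    · exact absurd h hne
    simp only [if_neg hne]
    have hn : 0 < (alphabet.length : Int) := by
      have := List.length_pos_iff.mpr hne; exact_mod_cast this
    set k := PySem.Int.mod shift_key (alphabet.length : Int) with hk
    have hk0 : 0 ≤ k := PySem.Int.mod_nonneg _ hn
    have hk1 : k < (alphabet.length : Int) := PySem.Int.mod_lt _ hn
    rw [PySem.List.slice_from alphabet hk0, PySem.List.slice_to alphabet hk0,
      ← List.rotate_eq_drop_append_take (by omega), permute_A_eq_map alphabet shift_key hpre hne]
    apply List.ext_getElem
    · simp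
    · intro i h1 h2
      simp only [List.getElem_map, List.getElem_range]
      rw [List.getElem_rotate]
      have hi : i < alphabet.length := by simpa using h2
      have hmodeq : (PySem.Int.mod ((i : Int) + shift_key) (alphabet.length : Int)).toNat
          = (i + k.toNat) % alphabet.length := by
        rw [PySem.Int.mod_eq_emod_of_pos hn]
        have hsk : shift_key % (alphabet.length : Int) = k := by
          rw [hk, PySem.Int.mod_eq_emod_of_pos hn]
        have : ((i : Int) + shift_key) % (alphabet.length : Int)
            = (((i + k.toNat) % alphabet.length : Nat) : Int) := by
          conv_lhs => rw [show shift_key = (alphabet.length : Int) * (shift_key / alphabet.length) + shift_key % alphabet.length from (Int.mul_ediv_add_emod _ _).symm]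
          rw [hsk, show ((i : Int) + ((alphabet.length : Int) * (shift_key / alphabet.length) + k)) = ((i : Int) + k) + (alphabet.length : Int) * (shift_key / alphabet.length) by ring,
            Int.add_mul_emod_self_left]
          rw [show (i : Int) + k = (((i + k.toNat : Nat) : Int)) by omega]
          exact (Int.natCast_mod _ _).symm
        omega
      rw [hmodeq, List.getD_eq_getElem _ _ (by exact Nat.mod_lt _ (by omega))]
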